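-- pv_equiv track=rewrite | github.com/Sur5ve/Sur5-Lite | sur5_lite_pyside/widgets/chat/thread_view.py | _compute_stream_delta
-- ===== SOURCE A (Python) =====
-- def _compute_stream_delta(cleaned_chunk: str, existing_buffer: str) -> str:
--     """Return only the new portion of a cleaned chunk, avoiding duplicate re-streaming."""
--     cleaned_chunk = cleaned_chunk.rstrip()
--     if not cleaned_chunk:
--         return ""
--
--     if not existing_buffer:
--         return cleaned_chunk
--
--     existing_buffer = existing_buffer.rstrip()
--
--     # If the existing buffer already contains the new chunk, nothing to append
--     if cleaned_chunk in existing_buffer: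
--         return ""
--
--     # If the new chunk fully contains the previous buffer, append only the new tail
--     if existing_buffer and cleaned_chunk.startswith(existing_buffer):
--         return cleaned_chunk[len(existing_buffer):]
--
--     max_overlap = min(len(existing_buffer), len(cleaned_chunk))
--     for overlap in range(max_overlap, 0, -1):
--         if existing_buffer[-overlap:] == cleaned_chunk[:overlap]:
--             return cleaned_chunk[overlap:]
--
--     # Fallback: avoid re-streaming tiny fragments that were already appended
--     for shift in range(1, min(4, len(cleaned_chunk))):
--         candidate = cleaned_chunk[shift:]
--         if candidate and existing_buffer.endswith(candidate[:len(candidate)]):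
--             return candidate
--
--     if cleaned_chunk == existing_buffer:
--         return ""
--
--     return cleaned_chunk
-- ===== SOURCE B (Python) =====
-- def _compute_stream_delta(cleaned_chunk: str, existing_buffer: str) -> str:
--     """Return only the new portion of a cleaned chunk, avoiding duplicate re-streaming.
--
--     Instead of trying every overlap length from largest to smallest (quadratic
--     slicing), jump between occurrences of the chunk's first character in the
--     buffer with str.find and test a single suffix-of-buffer / prefix-of-chunk
--     match at each occurrence.
--     """
--     cleaned_chunk = cleaned_chunk.rstrip()
--     if not cleaned_chunk:
--         return ""
--     if not existing_buffer:
--         return cleaned_chunk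
--     existing_buffer = existing_buffer.rstrip()
--
--     if cleaned_chunk in existing_buffer:
--         return ""
--
--     # Longest suffix of the buffer that is a prefix of the chunk: the first
--     # position i (scanning left to right) where buffer[i:] is a prefix of the
--     # chunk; only positions holding the chunk's first character can qualify.
--     first = cleaned_chunk[0]
--     i = existing_buffer.find(first)
--     while i != -1:
--         if cleaned_chunk.startswith(existing_buffer[i:]):
--             return cleaned_chunk[len(existing_buffer) - i:]
--         i = existing_buffer.find(first, i + 1)
--
--     # Tiny-fragment fallback: a short suffix of the chunk already at the
--     # buffer's end is re-emitted as-is.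
--     for shift in range(1, min(4, len(cleaned_chunk))):
--         candidate = cleaned_chunk[shift:]
--         if existing_buffer.endswith(candidate):
--             return candidate
--
--     return cleaned_chunk
-- ===== Notes on version B (the rewrite author's own statement) =====
-- stated objective: faster
-- what changed: B finds the longest buffer-suffix/chunk-prefix overlap by jumping with str.find between occurrences of the chunk's first character in the buffer and testing one startswith per occurrence (first hit = longest overlap), instead of A's slicing comparison at every overlap length from largest to smallest; B also drops A's dead startswith and equality branches.
import Mathlib
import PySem

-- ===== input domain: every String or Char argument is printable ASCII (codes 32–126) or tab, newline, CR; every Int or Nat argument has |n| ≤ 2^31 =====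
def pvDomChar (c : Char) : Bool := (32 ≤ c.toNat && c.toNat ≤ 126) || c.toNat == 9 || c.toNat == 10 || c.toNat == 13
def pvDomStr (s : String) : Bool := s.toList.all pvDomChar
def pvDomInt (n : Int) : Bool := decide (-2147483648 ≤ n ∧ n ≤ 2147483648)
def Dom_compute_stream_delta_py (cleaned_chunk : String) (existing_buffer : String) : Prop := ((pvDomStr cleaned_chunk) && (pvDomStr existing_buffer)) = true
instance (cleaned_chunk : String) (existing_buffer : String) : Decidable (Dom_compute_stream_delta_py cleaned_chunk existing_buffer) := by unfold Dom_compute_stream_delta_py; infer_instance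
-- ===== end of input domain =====

-- B replaces A's largest-to-smallest overlap scan by a left-to-right jump between
-- occurrences of the chunk's first character in the buffer (str.find), dropping A's
-- dead startswith/equality branches; objective: faster by a constant factor.

-- ===== PORT A =====
-- for overlap in range(max_overlap, 0, -1): if existing_buffer[-overlap:] == cleaned_chunk[:overlap]: return overlap
def aOverlapLoop (e c : List Char) : Nat → Option Nat
  | 0 => none
  | Nat.succ k =>
      if PySem.List.slice e (some (-((k + 1 : Nat) : Int))) none
           = PySem.List.slice c none (some ((k + 1 : Nat) : Int))
      then some (k + 1)
      else aOverlapLoop e c k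

-- for shift in range(1, min(4, len(cleaned_chunk))): candidate = cleaned_chunk[shift:]; if candidate and existing_buffer.endswith(candidate[:len(candidate)]): return candidate
def aFallbackLoop (e c : List Char) : List Int → Option (List Char)
  | [] => none
  | s :: rest =>
      let candidate := PySem.List.slice c (some s) none
      if candidate ≠ [] ∧ PySem.Chars.endswith e
           (PySem.List.slice candidate none (some ((candidate.length : Nat) : Int))) = true
      then some candidate
      else aFallbackLoop e c rest

-- the body after the two initial emptiness checks (c = rstripped chunk, e = rstripped buffer)
def aRest (c e : List Char) : List Char :=
  if PySem.Chars.isIn c e then []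
  else if e ≠ [] ∧ PySem.Chars.startswith c e = true then
    PySem.List.slice c (some ((e.length : Nat) : Int)) none
  else
    match aOverlapLoop e c (min e.length c.length) with
    | some k => PySem.List.slice c (some ((k : Nat) : Int)) none
    | none =>
      match aFallbackLoop e c (PySem.List.pyRange 1 (min 4 (c.length : Int)) 1) with
      | some cand => cand
      | none => if c = e then [] else c

def compute_stream_delta_py (cleaned_chunk : String) (existing_buffer : String) : String :=
  let c := PySem.Chars.rstrip cleaned_chunk.toList
  if c = [] then ""
  else if existing_buffer.toList = [] then String.ofList c
  else String.ofList (aRest c (PySem.Chars.rstrip existing_buffer.toList))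

-- ===== PORT B =====
-- i = existing_buffer.find(first); while i != -1: if cleaned_chunk.startswith(existing_buffer[i:]): return cleaned_chunk[len(existing_buffer)-i:]; i = existing_buffer.find(first, i+1)
-- (fuel bounds the iteration count; with fuel = len(e)+1 it is never exhausted, since i strictly increases)
def bLoop (c e : List Char) (first : Char) : Nat → Int → Option (List Char)
  | 0, _ => none
  | Nat.succ fuel, i =>
      if i = -1 then none
      else if PySem.Chars.startswith c (PySem.List.slice e (some i) none) = true then
        some (PySem.List.slice c (some ((e.length : Int) - i)) none)
      else bLoop c e first fuel (PySem.Chars.findFrom e [first] (i + 1) none)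

-- for shift in range(1, min(4, len(cleaned_chunk))): candidate = cleaned_chunk[shift:]; if existing_buffer.endswith(candidate): return candidate
def bFallbackLoop (e c : List Char) : List Int → Option (List Char)
  | [] => none
  | s :: rest =>
      let candidate := PySem.List.slice c (some s) none
      if PySem.Chars.endswith e candidate = true then some candidate
      else bFallbackLoop e c rest

def bRest (c e : List Char) : List Char :=
  if PySem.Chars.isIn c e then []
  else
    let first := c.headI
    match bLoop c e first (e.length + 1) (PySem.Chars.find e [first]) with
    | some r => r
    | none =>
      match bFallbackLoop e c (PySem.List.pyRange 1 (min 4 (c.length : Int)) 1) with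
      | some cand => cand
      | none => c

def compute_stream_delta_py_alt (cleaned_chunk : String) (existing_buffer : String) : String :=
  let c := PySem.Chars.rstrip cleaned_chunk.toList
  if c = [] then ""
  else if existing_buffer.toList = [] then String.ofList c
  else String.ofList (bRest c (PySem.Chars.rstrip existing_buffer.toList))

-- ===== PRECONDITION & SPEC =====
def Spec_compute_stream_delta_py (cleaned_chunk : String) (existing_buffer : String) (out : String) : Prop := out = compute_stream_delta_py_alt cleaned_chunk existing_buffer
instance (cleaned_chunk : String) (existing_buffer : String) (out : String) : Decidable (Spec_compute_stream_delta_py cleaned_chunk existing_buffer out) := by unfold Spec_compute_stream_delta_py; infer_instance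

-- ===== CLAIM (what is proved, stated in full; the proofs are below) =====
def Claim_equal_compute_stream_delta_py : Prop := ∀ (cleaned_chunk : String) (existing_buffer : String), Dom_compute_stream_delta_py cleaned_chunk existing_buffer → Spec_compute_stream_delta_py cleaned_chunk existing_buffer (compute_stream_delta_py cleaned_chunk existing_buffer)

-- ===== LEMMAS AND PROOFS =====

-- A's loop test at overlap k, rewritten to drop/take
theorem aTest_iff (e c : List Char) (k : Nat) (hk : 1 ≤ k) :
    (PySem.List.slice e (some (-((k : Nat) : Int))) none
       = PySem.List.slice c none (some ((k : Nat) : Int)))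
      ↔ e.drop (e.length - k) = c.take k := by
  rw [PySem.List.slice_from_neg_natCast (k := k) (xs := e) hk, PySem.List.slice_to_natCast]

-- correspondence between overlap length k and buffer position j = |e| - k
theorem test_iff_Q (e c : List Char) (k : Nat) (hk1 : 1 ≤ k) (hkm : k ≤ min e.length c.length) :
    (e.drop (e.length - k) = c.take k) ↔ e.drop (e.length - k) <+: c := by
  constructor
  · intro h; rw [h]; exact List.take_prefix _ _
  · intro h
    have hlen : (e.drop (e.length - k)).length = k := by
      simp only [List.length_drop]; omega
    rw [List.prefix_iff_eq_take] at h
    rw [h, hlen]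

theorem Q_gives_test (e c : List Char) (j : Nat) (hj : j < e.length) (hQ : e.drop j <+: c) :
    1 ≤ e.length - j ∧ e.length - j ≤ min e.length c.length ∧
      e.drop (e.length - (e.length - j)) = c.take (e.length - j) := by
  have hlenle : e.length - j ≤ c.length := by
    have := hQ.length_le
    simp only [List.length_drop] at this
    omega
  have hjj : e.length - (e.length - j) = j := by omega
  refine ⟨by omega, by omega, ?_⟩
  rw [hjj]
  rw [List.prefix_iff_eq_take] at hQ
  rw [hQ]
  congr 1
  simp only [List.length_drop]

theorem aOverlapLoop_eq_none_iff (e c : List Char) (m : Nat) :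
    aOverlapLoop e c m = none ↔
      ∀ k, 1 ≤ k → k ≤ m → ¬ (e.drop (e.length - k) = c.take k) := by
  induction m with
  | zero =>
      simp only [aOverlapLoop]
      constructor
      · intro _ k h1 h2 _; omega
      · intro _; trivial
  | succ m ih =>
      rw [aOverlapLoop]
      by_cases h : (PySem.List.slice e (some (-((m + 1 : Nat) : Int))) none
           = PySem.List.slice c none (some ((m + 1 : Nat) : Int)))
      · rw [if_pos h]
        constructor
        · intro hc; simp at hc
        · intro hall
          exact absurd ((aTest_iff e c (m+1) (by omega)).mp h)
            (hall (m+1) (by omega) le_rfl)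
      · rw [if_neg h, ih]
        constructor
        · intro hall k h1 h2 htest
          rcases Nat.eq_or_lt_of_le h2 with rfl | hlt
          · exact h ((aTest_iff e c _ h1).mpr htest)
          · exact hall k h1 (by omega) htest
        · intro hall k h1 h2 htest
          exact hall k h1 (by omega) htest

theorem aOverlapLoop_eq_some (e c : List Char) (m k : Nat)
    (h : aOverlapLoop e c m = some k) :
    1 ≤ k ∧ k ≤ m ∧ e.drop (e.length - k) = c.take k ∧
      ∀ j, k < j → j ≤ m → ¬ (e.drop (e.length - j) = c.take j) := by
  induction m with
  | zero => simp [aOverlapLoop] at h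
  | succ m ih =>
      rw [aOverlapLoop] at h
      by_cases ht : (PySem.List.slice e (some (-((m + 1 : Nat) : Int))) none
           = PySem.List.slice c none (some ((m + 1 : Nat) : Int)))
      · rw [if_pos ht] at h
        have hk : k = m + 1 := by injection h with h'; omega
        subst hk
        exact ⟨by omega, le_rfl, (aTest_iff e c (m+1) (by omega)).mp ht,
          fun j hj1 hj2 _ => by omega⟩
      · rw [if_neg ht] at h
        obtain ⟨h1, h2, h3, h4⟩ := ih h
        refine ⟨h1, by omega, h3, fun j hj1 hj2 htest => ?_⟩
        rcases Nat.eq_or_lt_of_le hj2 with rfl | hlt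
        · exact ht ((aTest_iff e c _ (by omega)).mpr htest)
        · exact h4 j hj1 (by omega) htest

-- a nonempty prefix of c starts with c's first character
theorem headI_prefix_of_prefix (c l : List Char) (h : l <+: c) (hl : l ≠ []) :
    [c.headI] <+: l := by
  obtain ⟨x, t, rfl⟩ := List.exists_cons_of_ne_nil hl
  obtain ⟨r, hr⟩ := h
  have hc : c = x :: (t ++ r) := by rw [← hr]; simp
  rw [hc]
  exact ⟨t, rfl⟩

-- B's loop: no position works → none (any fuel)
theorem bLoop_none (c e : List Char) (f : Char)
    (hQ : ∀ j, j < e.length → ¬ e.drop j <+: c) :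
    ∀ fuel i, (i = -1 ∨ (0 ≤ i ∧ [f] <+: e.drop i.toNat)) →
      bLoop c e f fuel i = none := by
  intro fuel
  induction fuel with
  | zero => intro i _; rfl
  | succ fuel ih =>
      intro i hi
      rw [bLoop]
      by_cases h1 : i = -1
      · rw [if_pos h1]
      · rw [if_neg h1]
        rcases hi with rfl | ⟨hge, hocc⟩
        · exact absurd rfl h1
        have hne : e.drop i.toNat ≠ [] := by
          intro hnil; rw [hnil] at hocc; simp at hocc
        have hlt : i.toNat < e.length := by
          by_contra hge'
          exact hne (List.drop_eq_nil_of_le (by omega))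
        have hsl : PySem.List.slice e (some i) none = e.drop i.toNat :=
          PySem.List.slice_from _ hge
        have hsw : ¬ PySem.Chars.startswith c (PySem.List.slice e (some i) none) = true := by
          rw [hsl, PySem.Chars.startswith_iff]
          exact hQ i.toNat hlt
        rw [if_neg hsw]
        apply ih
        have hcast : i + 1 = ((i.toNat + 1 : Nat) : Int) := by omega
        rw [hcast]
        by_cases h2 : PySem.Chars.findFrom e [f] ((i.toNat + 1 : Nat) : Int) none = -1
        · left; exact h2
        · right
          obtain ⟨hg, hocc', _⟩ :=
            PySem.Chars.findFrom_natCast_spec e [f] (i.toNat + 1) (by omega) h2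
          exact ⟨by omega, hocc'⟩

-- B's loop: j0 the least position whose buffer suffix is a chunk prefix → that answer
theorem bLoop_some (c e : List Char) (f : Char) (hf : f = c.headI)
    (j0 : Nat) (hj0 : j0 < e.length) (hQ0 : e.drop j0 <+: c)
    (hmin : ∀ j, j < j0 → ¬ e.drop j <+: c) :
    ∀ fuel i, 0 ≤ i → i.toNat ≤ j0 → [f] <+: e.drop i.toNat → j0 - i.toNat < fuel →
      bLoop c e f fuel i
        = some (PySem.List.slice c (some ((e.length : Int) - ((j0 : Nat) : Int))) none) := by
  have hoccj0 : [f] <+: e.drop j0 := by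
    rw [hf]
    exact headI_prefix_of_prefix c _ hQ0
      (by intro hnil; exact absurd (List.drop_eq_nil_iff.mp hnil) (by omega))
  intro fuel
  induction fuel with
  | zero => intro i _ _ _ hfuel; omega
  | succ fuel ih =>
      intro i h0 hle hocc hfuel
      rw [bLoop]
      rw [if_neg (by omega)]
      have hsl : PySem.List.slice e (some i) none = e.drop i.toNat :=
        PySem.List.slice_from _ h0
      by_cases hij : i.toNat = j0
      · have hi : i = ((j0 : Nat) : Int) := by omega
        have hsw : PySem.Chars.startswith c (PySem.List.slice e (some i) none) = true := by
          rw [hsl, PySem.Chars.startswith_iff, hij]; exact hQ0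
        rw [if_pos hsw, hi]
      · have hilt : i.toNat < j0 := by omega
        have hsw : ¬ PySem.Chars.startswith c (PySem.List.slice e (some i) none) = true := by
          rw [hsl, PySem.Chars.startswith_iff]
          exact hmin i.toNat hilt
        rw [if_neg hsw]
        have hcast : i + 1 = ((i.toNat + 1 : Nat) : Int) := by omega
        rw [hcast]
        have hkle : i.toNat + 1 ≤ e.length := by omega
        have hinf : [f] <:+: e.drop (i.toNat + 1) := by
          have hsub : e.drop j0 <:+ e.drop (i.toNat + 1) := by
            have : (e.drop (i.toNat + 1)).drop (j0 - (i.toNat + 1)) = e.drop j0 := by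
              rw [List.drop_drop]; congr 1; omega
            rw [← this]; exact List.drop_suffix _ _
          exact hoccj0.isInfix.trans hsub.isInfix
        have hne1 : PySem.Chars.findFrom e [f] ((i.toNat + 1 : Nat) : Int) none ≠ -1 := by
          intro hcon
          rw [PySem.Chars.findFrom_natCast_eq_neg_one_iff e [f] (i.toNat + 1) hkle] at hcon
          exact hcon hinf
        obtain ⟨hg, hocc', hmin'⟩ :=
          PySem.Chars.findFrom_natCast_spec e [f] (i.toNat + 1) hkle hne1
        set i' := PySem.Chars.findFrom e [f] ((i.toNat + 1 : Nat) : Int) none with hi'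
        have hle' : i'.toNat ≤ j0 := by
          by_contra hgt
          exact hmin' j0 (by omega) (by omega) hoccj0
        exact ih i' (by omega) hle' hocc' (by omega)

-- the two fallback loops agree on the shift range both use
theorem fallback_eq (e c : List Char) :
    ∀ L : List Int, (∀ s ∈ L, 1 ≤ s ∧ s < (c.length : Int)) →
      aFallbackLoop e c L = bFallbackLoop e c L := by
  intro L
  induction L with
  | nil => intro _; rfl
  | cons s rest ih =>
      intro hall
      obtain ⟨hs1, hs2⟩ := hall s List.mem_cons_self
      have h0 : (0 : Int) ≤ s := by omega
      have hcand : PySem.List.slice c (some s) none = c.drop s.toNat :=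
        PySem.List.slice_from _ h0
      have hlt : s.toNat < c.length := by omega
      have hne : c.drop s.toNat ≠ [] := by
        intro hnil; exact absurd (List.drop_eq_nil_iff.mp hnil) (by omega)
      rw [aFallbackLoop, bFallbackLoop]
      simp only [hcand, PySem.List.slice_to_natCast, List.take_length]
      by_cases hend : PySem.Chars.endswith e (c.drop s.toNat) = true
      · rw [if_pos ⟨hne, hend⟩, if_pos hend]
      · rw [if_neg (by intro hcon; exact hend hcon.2), if_neg hend]
        exact ih (fun x hx => hall x (List.mem_cons_of_mem _ hx))

-- membership facts for the shared fallback shift range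
theorem fallback_range_ok (c : List Char) (hc : c ≠ []) :
    ∀ s ∈ PySem.List.pyRange 1 (min 4 (c.length : Int)) 1, 1 ≤ s ∧ s < (c.length : Int) := by
  intro s hs
  rw [PySem.List.mem_pyRange_one] at hs
  have hcl : (1 : Int) ≤ (c.length : Int) := by
    have : 0 < c.length := List.length_pos_of_ne_nil hc
    omega
  omega

-- main body equality after the emptiness checks
theorem rest_eq (c e : List Char) (hc : c ≠ []) : aRest c e = bRest c e := by
  unfold aRest bRest
  by_cases hin : PySem.Chars.isIn c e = true
  · simp only [hin, if_true]
  · simp only [hin, if_false, Bool.false_eq_true]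
    have hcne : c ≠ e := by
      intro hce
      apply hin
      rw [PySem.Chars.isIn_iff_infix]
      exact hce ▸ List.infix_refl c
    by_cases hex : ∃ j, j < e.length ∧ e.drop j <+: c
    · -- least such position
      have hfind := Nat.find_spec hex
      set j0 := Nat.find hex with hj0def
      obtain ⟨hj0lt, hQ0⟩ := hfind
      have hmin : ∀ j, j < j0 → ¬ e.drop j <+: c := by
        intro j hj hQ
        have hjlt : j < e.length := by omega
        exact Nat.find_min hex hj ⟨hjlt, hQ⟩
      -- B's loop returns slice c (|e| - j0:)
      have hoccj0 : [c.headI] <+: e.drop j0 :=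
        headI_prefix_of_prefix c _ hQ0
          (by intro hnil; exact absurd (List.drop_eq_nil_iff.mp hnil) (by omega))
      have hinf : [c.headI] <:+: e := by
        exact hoccj0.isInfix.trans (List.drop_suffix _ _).isInfix
      have hfge : 0 ≤ PySem.Chars.find e [c.headI] := by
        rw [PySem.Chars.find_nonneg_iff]
        exact hinf
      obtain ⟨hocc0, hmin0⟩ := PySem.Chars.find_spec (s := e) (sub := [c.headI]) hfge
      have hfle : (PySem.Chars.find e [c.headI]).toNat ≤ j0 := by
        by_contra hgt
        exact hmin0 j0 (by omega) hoccj0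
      have hB : bLoop c e c.headI (e.length + 1) (PySem.Chars.find e [c.headI])
          = some (PySem.List.slice c (some ((e.length : Int) - ((j0 : Nat) : Int))) none) :=
        bLoop_some c e c.headI rfl j0 hj0lt hQ0 hmin (e.length + 1)
          (PySem.Chars.find e [c.headI]) hfge hfle hocc0 (by omega)
      rw [hB]
      -- A's side
      by_cases hsw : e ≠ [] ∧ PySem.Chars.startswith c e = true
      · -- e is a prefix of c: j0 = 0
        have hQ00 : e.drop 0 <+: c := by
          rw [List.drop_zero, ← PySem.Chars.startswith_iff]
          exact hsw.2
        have hj00 : j0 = 0 := by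
          by_contra hne0
          exact hmin 0 (by omega) hQ00
        rw [if_pos hsw, hj00]
        simp
      · rw [if_neg hsw]
        -- the overlap loop finds k = |e| - j0
        rcases hA : aOverlapLoop e c (min e.length c.length) with _ | k
        · exfalso
          obtain ⟨hk1, hk2, hk3⟩ := Q_gives_test e c j0 hj0lt hQ0
          exact (aOverlapLoop_eq_none_iff e c _).mp hA _ hk1 hk2 hk3
        · obtain ⟨h1, h2, h3, h4⟩ := aOverlapLoop_eq_some e c _ k hA
          have hQk : e.drop (e.length - k) <+: c := (test_iff_Q e c k h1 h2).mp h3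
          have hklt : e.length - k < e.length := by omega
          have hj0le : j0 ≤ e.length - k := by
            rcases Nat.lt_or_ge (e.length - k) j0 with hlt' | hge'
            · exact absurd hQk (hmin _ hlt')
            · exact hge'
          obtain ⟨hk1', hk2', hk3'⟩ := Q_gives_test e c j0 hj0lt hQ0
          have hkge : k = e.length - j0 := by
            rcases Nat.lt_or_ge k (e.length - j0) with hlt' | hge'
            · exact absurd hk3' (h4 _ (by omega) hk2')
            · omega
          have hcast : ((e.length - j0 : Nat) : Int) = (e.length : Int) - ((j0 : Nat) : Int) := by
            omega
          rw [hkge]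
          simp only [hcast]
    · -- no overlap position at all
      have hex' : ∀ j, j < e.length → ¬ e.drop j <+: c := by
        intro j hj hQ
        exact hex ⟨j, hj, hQ⟩
      have hB : bLoop c e c.headI (e.length + 1) (PySem.Chars.find e [c.headI]) = none := by
        apply bLoop_none c e c.headI hex'
        by_cases hf : PySem.Chars.find e [c.headI] = -1
        · left; exact hf
        · right
          have hge : 0 ≤ PySem.Chars.find e [c.headI] := by
            have := PySem.Chars.neg_one_le_find (s := e) (sub := [c.headI])
            omega
          exact ⟨hge, (PySem.Chars.find_spec (s := e) (sub := [c.headI]) hge).1⟩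
      have hA : aOverlapLoop e c (min e.length c.length) = none := by
        rw [aOverlapLoop_eq_none_iff]
        intro k h1 h2 htest
        have hQ := (test_iff_Q e c k h1 h2).mp htest
        exact hex' _ (by omega) hQ
      have hsw : ¬ (e ≠ [] ∧ PySem.Chars.startswith c e = true) := by
        rintro ⟨hene, hsw'⟩
        have h0 : e.drop 0 <+: c := by
          rw [List.drop_zero, ← PySem.Chars.startswith_iff]
          exact hsw'
        have : 0 < e.length := List.length_pos_of_ne_nil hene
        exact hex' 0 this h0
      rw [if_neg hsw, hA, hB]
      rw [fallback_eq e c _ (fallback_range_ok c hc)]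
      rcases hfb : bFallbackLoop e c (PySem.List.pyRange 1 (min 4 (c.length : Int)) 1) with _ | cand
      · rw [if_neg hcne]
      · rfl

-- ===== VERDICT (by name: the statement is the Claim_ definition above) =====
theorem compute_stream_delta_py_spec : Claim_equal_compute_stream_delta_py := by
  intro cleaned_chunk existing_buffer _
  unfold Spec_compute_stream_delta_py compute_stream_delta_py compute_stream_delta_py_alt
  by_cases h1 : PySem.Chars.rstrip cleaned_chunk.toList = []
  · simp only [h1, if_true]
  · by_cases h2 : existing_buffer.toList = []
    · simp only [h1, h2, if_false, if_true]
    · simp only [h1, h2, if_false]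
      rw [rest_eq _ _ h1]
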